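-- pv_equiv track=rewrite | github.com/pzweuj/practice | python/Cancer/annoFixNCCL.py | AATranslate
-- ===== SOURCE A (Python) =====
-- def AATranslate(seq):
--     transDict = {
--         "Ala": "A", "Arg": "R", "Asn": "N",
--         "Asp": "D", "Cys": "C", "Gln": "Q",
--         "Glu": "E", "Gly": "G", "His": "H",
--         "Ile": "I", "Leu": "L", "Lys": "K",
--         "Met": "M", "Phe": "F", "Pro": "P",
--         "Ser": "S", "Thr": "T", "Trp": "W",
--         "Tyr": "Y", "Val": "V"
--     }
--     for i in transDict.keys():
--         if i in seq:
--             seq = seq.replace(i, transDict[i])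
--
--     return seq
-- ===== SOURCE B (Python) =====
-- def AATranslate(seq):
--     codes = "Ala Arg Asn Asp Cys Gln Glu Gly His Ile Leu Lys Met Phe Pro Ser Thr Trp Tyr Val"
--     transDict = dict(zip(codes.split(), "ARNDCQEGHILKMFPSTWYV"))
--     out = []
--     i = 0
--     n = len(seq)
--     while i < n:
--         tok = seq[i:i+3]
--         if tok in transDict:
--             out.append(transDict[tok])
--             i += 3
--         else:
--             out.append(seq[i])
--             i += 1
--     return "".join(out)
-- ===== Notes on version B (the rewrite author's own statement) =====
-- stated objective: alternative
-- what changed: B replaces A's 20 sequential whole-string replace passes (one per amino-acid code) with a single left-to-right scan that looks each 3-character window up in the dict once, emitting the translation as it goes.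
-- intended difference: On strings containing one of the cascade substrings Alarg/Alasn/Alasp/Leuys/Thrrp/Thryr, A's earlier replacement creates a fresh code that a later pass also replaces (e.g. 'Alarg' -> 'Arg' -> 'R'), while B translates each original code once ('Alarg' -> 'Arg'); B's one-translation-per-original-code result is the intended behaviour for code translation. — e.g. on AATranslate("Alarg"): A returns "R", B returns "Arg"
import Mathlib
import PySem

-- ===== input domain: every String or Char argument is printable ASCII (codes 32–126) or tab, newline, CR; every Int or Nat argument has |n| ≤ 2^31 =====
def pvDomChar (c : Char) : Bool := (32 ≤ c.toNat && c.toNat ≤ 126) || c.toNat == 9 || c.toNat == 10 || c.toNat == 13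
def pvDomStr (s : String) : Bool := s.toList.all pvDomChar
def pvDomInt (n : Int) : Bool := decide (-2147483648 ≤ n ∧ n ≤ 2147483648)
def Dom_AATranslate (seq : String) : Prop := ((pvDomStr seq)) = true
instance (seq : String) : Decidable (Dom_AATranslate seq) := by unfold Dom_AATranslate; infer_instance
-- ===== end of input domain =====

-- B replaces A's 20 sequential whole-string replace passes with one left-to-right scan that
-- looks each 3-character window up in the code table once (objective: alternative algorithm);
-- on the cascade inputs D_ below A re-replaces codes its own earlier passes created, B returns
-- the intended one-translation-per-original-code result.

-- ===== PORT A =====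
-- transDict, as its insertion-ordered (key, value) association list (type convention)
def pvPairs : List (String × String) :=
  [("Ala", "A"), ("Arg", "R"), ("Asn", "N"),
   ("Asp", "D"), ("Cys", "C"), ("Gln", "Q"),
   ("Glu", "E"), ("Gly", "G"), ("His", "H"),
   ("Ile", "I"), ("Leu", "L"), ("Lys", "K"),
   ("Met", "M"), ("Phe", "F"), ("Pro", "P"),
   ("Ser", "S"), ("Thr", "T"), ("Trp", "W"),
   ("Tyr", "Y"), ("Val", "V")]

-- 'for i in transDict.keys(): if i in seq: seq = seq.replace(i, transDict[i])'
-- (iterating the keys in insertion order, looking each key up = folding over the items)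
def AATranslate (seq : String) : String :=
  pvPairs.foldl
    (fun s kv => if PySem.Str.isIn kv.1 s then PySem.Str.replace s kv.1 kv.2 else s)
    seq

-- ===== PORT B =====
-- dict(zip(codes.split(), "ARNDCQEGHILKMFPSTWYV")): iterating the value string gives
-- its characters as 1-character strings
def pvDictB : PySem.Dict String String :=
  PySem.Dict.ofList
    (List.zip
      (PySem.Str.split₀ "Ala Arg Asn Asp Cys Gln Glu Gly His Ile Leu Lys Met Phe Pro Ser Thr Trp Tyr Val")
      ("ARNDCQEGHILKMFPSTWYV".toList.map (fun c => String.ofList [c])))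

-- the while loop of Source B: i advances by 3 on a code hit, by 1 otherwise; pieces joined at the end
def pvAltGo (seq : String) (n : Int) (i : Int) : List String :=
  if _h : i < n then
    let tok := PySem.Str.slice seq (some i) (some (i + 3))
    if pvDictB.contains tok then
      pvDictB.getD tok "" :: pvAltGo seq n (i + 3)
    else
      -- seq[i] (a 1-character string; i < n keeps the index in range)
      ((PySem.Str.pyGet? seq i).map (fun c => String.ofList [c])).getD "" :: pvAltGo seq n (i + 1)
  else []
termination_by (n - i).toNat
decreasing_by all_goals omega

def AATranslate_alt (seq : String) : String :=
  PySem.Str.join "" (pvAltGo seq (PySem.Str.len seq) 0)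

-- ===== PRECONDITION & SPEC =====
-- On strings containing one of the cascade substrings Alarg/Alasn/Alasp/Leuys/Thrrp/Thryr,
-- A's earlier replacement creates a fresh three-letter code that a later pass replaces again
-- (e.g. "Alarg" -> "Arg" -> "R"), while B translates each original code exactly once
-- ("Alarg" -> "Arg"); B's one-translation-per-original-code result is the intended behaviour.
def D_AATranslate (seq : String) : Prop :=
  PySem.Str.isIn "Alarg" seq = true ∨ PySem.Str.isIn "Alasn" seq = true ∨
  PySem.Str.isIn "Alasp" seq = true ∨ PySem.Str.isIn "Leuys" seq = true ∨
  PySem.Str.isIn "Thrrp" seq = true ∨ PySem.Str.isIn "Thryr" seq = true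
instance (seq : String) : Decidable (D_AATranslate seq) := by unfold D_AATranslate; infer_instance

def Spec_AATranslate (seq : String) (out : String) : Prop :=
  ¬ D_AATranslate seq → out = AATranslate_alt seq
instance (seq : String) (out : String) : Decidable (Spec_AATranslate seq out) := by
  unfold Spec_AATranslate; infer_instance

def pvDiffWitness_AATranslate : String := "Alarg"
def pvDiffWitnessOut_AATranslate : String × String := ("R", "Arg")

-- ===== CLAIM (what is proved, stated in full; the proofs are below) =====
def Claim_unchanged_AATranslate : Prop :=
  ∀ (seq : String), Dom_AATranslate seq → Spec_AATranslate seq (AATranslate seq)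
def Claim_changed_AATranslate : Prop :=
  Dom_AATranslate (pvDiffWitness_AATranslate) ∧ D_AATranslate (pvDiffWitness_AATranslate) ∧
  AATranslate (pvDiffWitness_AATranslate) = pvDiffWitnessOut_AATranslate.1 ∧
  AATranslate_alt (pvDiffWitness_AATranslate) = pvDiffWitnessOut_AATranslate.2 ∧
  pvDiffWitnessOut_AATranslate.1 ≠ pvDiffWitnessOut_AATranslate.2

def Claim_exact_AATranslate : Prop :=
  ∀ (seq : String), Dom_AATranslate seq → D_AATranslate seq →
    AATranslate seq ≠ AATranslate_alt seq

-- ===== LEMMAS AND PROOFS =====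

-- ---- character-level model: a pass is (1st, 2nd, 3rd char of a code, its letter)
abbrev PvP := Char × Char × Char × Char

def pvL20 : List PvP :=
  [('A','l','a','A'), ('A','r','g','R'), ('A','s','n','N'),
   ('A','s','p','D'), ('C','y','s','C'), ('G','l','n','Q'),
   ('G','l','u','E'), ('G','l','y','G'), ('H','i','s','H'),
   ('I','l','e','I'), ('L','e','u','L'), ('L','y','s','K'),
   ('M','e','t','M'), ('P','h','e','F'), ('P','r','o','P'),
   ('S','e','r','S'), ('T','h','r','T'), ('T','r','p','W'),
   ('T','y','r','Y'), ('V','a','l','V')]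

-- Python str.replace for a 3-character pattern, as plain structural recursion
def pvRepl (p : PvP) : List Char → List Char
  | x :: y :: z :: t =>
    if x = p.1 ∧ y = p.2.1 ∧ z = p.2.2.1 then p.2.2.2 :: pvRepl p t
    else x :: pvRepl p (y :: z :: t)
  | s => s

def pvAll (ps : List PvP) (s : List Char) : List Char := ps.foldl (fun s p => pvRepl p s) s

-- the single left-to-right pass
def pvOne (ps : List PvP) : List Char → List Char
  | x :: y :: z :: t =>
    match ps.find? (fun p => decide (x = p.1 ∧ y = p.2.1 ∧ z = p.2.2.1)) with
    | some p => p.2.2.2 :: pvOne ps t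
    | none => x :: pvOne ps (y :: z :: t)
  | s => s

def pvMatch (p : PvP) (s : List Char) : Prop := ∃ t, s = p.1 :: p.2.1 :: p.2.2.1 :: t

-- table structure: chars 2,3 of a code are never a value letter and never a code head
def pvStruct (ps : List PvP) : Prop :=
  ∀ p ∈ ps, ∀ q ∈ ps,
    p.2.1 ≠ q.2.2.2 ∧ p.2.2.1 ≠ q.2.2.2 ∧ p.2.1 ≠ q.1 ∧ p.2.2.1 ≠ q.1

def pvBad5 (p q : PvP) : List Char := [p.1, p.2.1, p.2.2.1, q.2.1, q.2.2.1]

def pvBadFree (ps : List PvP) (cs : List Char) : Prop :=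
  ∀ p q : PvP, (∃ pre post, ps = pre ++ p :: post ∧ q ∈ post) →
    q.1 = p.2.2.2 → ¬ (pvBad5 p q <:+: cs)

theorem pvPrefix3 {a b c : Char} {l : List Char} :
    ([a, b, c] <+: l) ↔ ∃ t, l = a :: b :: c :: t :=
  ⟨fun ⟨t, ht⟩ => ⟨t, ht.symm⟩, fun ⟨t, ht⟩ => ⟨t, ht.symm⟩⟩

theorem pvRepl_short {p : PvP} {s : List Char} (h : s.length < 3) : pvRepl p s = s := by
  match s with
  | [] => rfl
  | [_] => rfl
  | [_, _] => rfl
  | _ :: _ :: _ :: _ => simp only [List.length_cons] at h; omega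

theorem pvRepl_nomatch {p : PvP} {c : Char} {t : List Char} (h : ¬ pvMatch p (c :: t)) :
    pvRepl p (c :: t) = c :: pvRepl p t := by
  match t with
  | [] => rfl
  | [_] => rfl
  | y :: z :: t2 =>
    rw [pvRepl]
    split_ifs with hc
    · exact absurd ⟨t2, by rw [hc.1, hc.2.1, hc.2.2]⟩ h
    · rfl

theorem pvRepl_match (p : PvP) (t : List Char) :
    pvRepl p (p.1 :: p.2.1 :: p.2.2.1 :: t) = p.2.2.2 :: pvRepl p t := by
  rw [pvRepl]; simp

theorem pvL1 {p : PvP} {x : Char} {t r : List Char} (hx : x ≠ p.2.2.2)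
    (h : pvRepl p t = x :: r) : ∃ t', t = x :: t' ∧ r = pvRepl p t' := by
  match t with
  | [] => exact absurd h (by simp [pvRepl])
  | [c] =>
    rw [pvRepl_short (by simp)] at h
    obtain ⟨rfl, rfl⟩ := List.cons_eq_cons.mp h
    exact ⟨[], rfl, rfl⟩
  | [c, d] =>
    rw [pvRepl_short (by simp)] at h
    obtain ⟨rfl, rfl⟩ := List.cons_eq_cons.mp h
    exact ⟨[d], rfl, (pvRepl_short (by simp)).symm⟩
  | c :: y :: z :: t2 =>
    rw [pvRepl] at h
    split_ifs at h with hc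
    · exact absurd (List.cons_eq_cons.mp h).1.symm hx
    · obtain ⟨rfl, h2⟩ := List.cons_eq_cons.mp h
      exact ⟨y :: z :: t2, rfl, h2.symm⟩

theorem pvL1s {ps : List PvP} {x : Char} {t r : List Char}
    (hx : ∀ p ∈ ps, x ≠ p.2.2.2) (h : pvAll ps t = x :: r) :
    ∃ t', t = x :: t' ∧ r = pvAll ps t' := by
  induction ps generalizing t with
  | nil => exact ⟨r, h, rfl⟩
  | cons p rest ih =>
    simp only [pvAll, List.foldl_cons] at h
    obtain ⟨u, hu, hr⟩ := ih (fun q hq => hx q (List.mem_cons_of_mem _ hq)) h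
    obtain ⟨t', ht, hu'⟩ := pvL1 (hx p (List.mem_cons_self ..)) hu
    exact ⟨t', ht, by simpa [pvAll, hu'] using hr⟩

theorem pvAll_short {ps : List PvP} {s : List Char} (h : s.length < 3) : pvAll ps s = s := by
  induction ps generalizing s with
  | nil => rfl
  | cons p rest ih =>
    simp only [pvAll, List.foldl_cons]
    rw [pvRepl_short h]; exact ih h

theorem pvStruct_mono {ps qs : List PvP} (h : ∀ p ∈ qs, p ∈ ps) (hs : pvStruct ps) :
    pvStruct qs := fun p hp q hq => hs p (h p hp) q (h q hq)

theorem pvHeadSkip {ps : List PvP} (hS : pvStruct ps) :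
    ∀ {c : Char} {t : List Char}, (∀ p ∈ ps, ¬ pvMatch p (c :: t)) →
    pvAll ps (c :: t) = c :: pvAll ps t := by
  induction ps with
  | nil => intro c t _; rfl
  | cons p0 rest ih =>
    intro c t h
    have hS' : pvStruct rest := pvStruct_mono (fun q hq => List.mem_cons_of_mem _ hq) hS
    simp only [pvAll, List.foldl_cons]
    rw [pvRepl_nomatch (h p0 (List.mem_cons_self ..))]
    have hrec : ∀ q ∈ rest, ¬ pvMatch q (c :: pvRepl p0 t) := by
      intro q hq hm
      obtain ⟨w, hw⟩ := hm
      have hq' : q ∈ p0 :: rest := List.mem_cons_of_mem _ hq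
      have h1 : q.2.1 ≠ p0.2.2.2 := (hS q hq' p0 (List.mem_cons_self ..)).1
      have h2 : q.2.2.1 ≠ p0.2.2.2 := (hS q hq' p0 (List.mem_cons_self ..)).2.1
      obtain ⟨hc, hw2⟩ := List.cons_eq_cons.mp hw
      obtain ⟨t1, ht1, hr1⟩ := pvL1 h1 hw2
      obtain ⟨t2, ht2, _⟩ := pvL1 h2 hr1.symm
      exact h q hq' ⟨t2, by rw [hc, ht1, ht2]⟩
    have := ih hS' hrec
    simp only [pvAll] at this ⊢
    rw [this]

theorem pvAll_append (l1 l2 : List PvP) (s : List Char) :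
    pvAll (l1 ++ l2) s = pvAll l2 (pvAll l1 s) := List.foldl_append ..

theorem pvBadFree_mono {ps : List PvP} {cs cs' : List Char} (h : cs' <:+: cs)
    (hb : pvBadFree ps cs) : pvBadFree ps cs' :=
  fun p q hsp hq hinf => hb p q hsp hq (hinf.trans h)

theorem pvOne_short {ps : List PvP} {s : List Char} (h : s.length < 3) : pvOne ps s = s := by
  match s with
  | [] => rfl
  | [_] => rfl
  | [_, _] => rfl
  | _ :: _ :: _ :: _ => simp only [List.length_cons] at h; omega

-- one sequential pass-set step at a code occurrence, when no cascade starts there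
theorem pvStepSome {ps : List PvP} {p : PvP} {t : List Char} (hS : pvStruct ps)
    (hf : ps.find? (fun r => decide (p.1 = r.1 ∧ p.2.1 = r.2.1 ∧ p.2.2.1 = r.2.2.1)) = some p)
    (hnc : ∀ pre post q t2, ps = pre ++ p :: post → q ∈ post → q.1 = p.2.2.2 →
      t ≠ q.2.1 :: q.2.2.1 :: t2) :
    pvAll ps (p.1 :: p.2.1 :: p.2.2.1 :: t) = p.2.2.2 :: pvAll ps t := by
  obtain ⟨_, pre, post, hsplit, hpre⟩ := List.find?_eq_some_iff_append.mp hf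
  have hmemps : ∀ r ∈ pre, r ∈ ps := fun r hr => hsplit ▸ List.mem_append_left _ hr
  have hmemps' : ∀ r ∈ post, r ∈ ps := fun r hr =>
    hsplit ▸ List.mem_append_right _ (List.mem_cons_of_mem _ hr)
  have hpps : p ∈ ps := hsplit ▸ List.mem_append_right _ (List.mem_cons_self ..)
  have hSpre : pvStruct pre := pvStruct_mono hmemps hS
  have hSpost : pvStruct post := pvStruct_mono hmemps' hS
  -- the earlier passes slide over the code occurrence
  have h1 : ∀ q ∈ pre, ¬ pvMatch q (p.1 :: p.2.1 :: p.2.2.1 :: t) := by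
    intro q hq hm
    obtain ⟨w, hw⟩ := hm
    obtain ⟨e1, hw⟩ := List.cons_eq_cons.mp hw
    obtain ⟨e2, hw⟩ := List.cons_eq_cons.mp hw
    obtain ⟨e3, _⟩ := List.cons_eq_cons.mp hw
    have := hpre q hq
    simp only [Bool.not_eq_eq_eq_not, Bool.not_true, decide_eq_false_iff_not] at this
    exact this ⟨e1, e2, e3⟩
  have h2 : ∀ q ∈ pre, ¬ pvMatch q (p.2.1 :: p.2.2.1 :: t) := by
    intro q hq hm
    obtain ⟨w, hw⟩ := hm
    exact (hS p hpps q (hmemps q hq)).2.2.1 (List.cons_eq_cons.mp hw).1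
  have h3 : ∀ q ∈ pre, ¬ pvMatch q (p.2.2.1 :: t) := by
    intro q hq hm
    obtain ⟨w, hw⟩ := hm
    exact (hS p hpps q (hmemps q hq)).2.2.2 (List.cons_eq_cons.mp hw).1
  have hpreAll : pvAll pre (p.1 :: p.2.1 :: p.2.2.1 :: t)
      = p.1 :: p.2.1 :: p.2.2.1 :: pvAll pre t := by
    rw [pvHeadSkip hSpre h1, pvHeadSkip hSpre h2, pvHeadSkip hSpre h3]
  -- later passes cannot match at the fresh letter: that would be a cascade
  have hpost : ∀ q ∈ post, ¬ pvMatch q (p.2.2.2 :: pvRepl p (pvAll pre t)) := by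
    intro q hq hm
    obtain ⟨w, hw⟩ := hm
    obtain ⟨hc, hw2⟩ := List.cons_eq_cons.mp hw
    have hqps : q ∈ ps := hmemps' q hq
    have hA : q.2.1 ≠ p.2.2.2 := (hS q hqps p hpps).1
    have hB : q.2.2.1 ≠ p.2.2.2 := (hS q hqps p hpps).2.1
    have hApre : ∀ r ∈ pre, q.2.1 ≠ r.2.2.2 :=
      fun r hr => (hS q hqps r (hmemps r hr)).1
    have hBpre : ∀ r ∈ pre, q.2.2.1 ≠ r.2.2.2 :=
      fun r hr => (hS q hqps r (hmemps r hr)).2.1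
    obtain ⟨u1, hu1, hr1⟩ := pvL1 hA hw2
    obtain ⟨t1, ht1, hu1'⟩ := pvL1s hApre hu1
    obtain ⟨u2, hu2, _⟩ := pvL1 hB hr1.symm
    obtain ⟨t2, ht2, _⟩ := pvL1s hBpre (hu1'.symm.trans hu2)
    exact hnc pre post q t2 hsplit hq hc.symm (by rw [ht1, ht2])
  have hsplitAll : ∀ u, pvAll ps u = pvAll post (pvRepl p (pvAll pre u)) := by
    intro u
    rw [hsplit, pvAll_append]
    simp [pvAll]
  rw [hsplitAll, hpreAll, pvRepl_match, pvHeadSkip hSpost hpost, ← hsplitAll t]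

-- main induction: the 20 sequential passes equal the single pass on cascade-free strings
theorem pvGen {ps : List PvP} (hS : pvStruct ps) :
    ∀ (n : Nat) (cs : List Char), cs.length ≤ n → pvBadFree ps cs →
      pvAll ps cs = pvOne ps cs := by
  intro n
  induction n with
  | zero =>
    intro cs hlen _
    have : cs = [] := List.eq_nil_of_length_eq_zero (Nat.le_zero.mp hlen)
    subst this
    rw [pvAll_short (by simp), pvOne_short (by simp)]
  | succ n ih =>
    intro cs hlen hbf
    match hcs : cs with
    | [] => rw [pvAll_short (by simp), pvOne_short (by simp)]
    | [x] => rw [pvAll_short (by simp), pvOne_short (by simp)]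
    | [x, y] => rw [pvAll_short (by simp), pvOne_short (by simp)]
    | x :: y :: z :: t =>
      subst hcs
      cases hf : ps.find? (fun p => decide (x = p.1 ∧ y = p.2.1 ∧ z = p.2.2.1)) with
      | none =>
        have hno : ∀ p ∈ ps, ¬ pvMatch p (x :: y :: z :: t) := by
          intro p hp hm
          obtain ⟨w, hw⟩ := hm
          obtain ⟨e1, hw⟩ := List.cons_eq_cons.mp hw
          obtain ⟨e2, hw⟩ := List.cons_eq_cons.mp hw
          obtain ⟨e3, _⟩ := List.cons_eq_cons.mp hw
          have := List.find?_eq_none.mp hf p hp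
          simp only [decide_eq_true_eq] at this
          exact this ⟨e1, e2, e3⟩
        rw [pvHeadSkip hS hno]
        rw [ih (y :: z :: t) (by simp at hlen ⊢; omega)
              (pvBadFree_mono ⟨[x], [], by simp⟩ hbf)]
        conv_rhs => rw [pvOne, hf]
      | some p =>
        have hpred := List.find?_some hf
        simp only [decide_eq_true_eq] at hpred
        obtain ⟨hx, hy, hz⟩ := hpred
        subst hx; subst hy; subst hz
        have hnc : ∀ pre post q t2, ps = pre ++ p :: post → q ∈ post → q.1 = p.2.2.2 →
            t ≠ q.2.1 :: q.2.2.1 :: t2 := by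
          intro pre post q t2 hsp hq hq1 hteq
          exact hbf p q ⟨pre, post, hsp, hq⟩ hq1 ⟨[], t2, by rw [hteq]; simp [pvBad5]⟩
        rw [pvStepSome hS hf hnc,
          ih t (by simp at hlen ⊢; omega)
            (pvBadFree_mono ⟨[p.1, p.2.1, p.2.2.1], [], by simp⟩ hbf)]
        conv_rhs => rw [pvOne, hf]

-- the table facts, decided once
theorem pvStruct_L20 : pvStruct pvL20 := by unfold pvStruct; decide

def pvBadL : List (List Char) :=
  [['A','l','a','r','g'], ['A','l','a','s','n'], ['A','l','a','s','p'],
   ['L','e','u','y','s'], ['T','h','r','r','p'], ['T','h','r','y','r']]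

set_option maxRecDepth 4096 in
theorem pvPairwise_L20 :
    pvL20.Pairwise (fun p q => q.1 = p.2.2.2 → pvBad5 p q ∈ pvBadL) := by
  unfold pvBad5 pvBadL; decide

theorem pvBadL_len : ∀ b ∈ pvBadL, b.length = 5 := by decide

theorem pvBadL_key : ∀ b ∈ pvBadL, ∃ r ∈ pvL20, b.take 3 = [r.1, r.2.1, r.2.2.1] := by decide

theorem pvAll_cons (p : PvP) (l : List PvP) (s : List Char) :
    pvAll (p :: l) s = pvAll l (pvRepl p s) := rfl

-- at a cascade site the two results differ already in their first character
theorem pvCascNe {ps pre post post1 post2 : List PvP} {p q : PvP} (hS : pvStruct ps)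
    (hsplit : ps = pre ++ p :: post) (hpost : post = post1 ++ q :: post2)
    (hq1 : q.1 = p.2.2.2) (hvne : q.2.2.2 ≠ p.2.2.2) (hvnh : ∀ r ∈ ps, q.2.2.2 ≠ r.1)
    (hpre : ∀ r ∈ pre, ¬(p.1 = r.1 ∧ p.2.1 = r.2.1 ∧ p.2.2.1 = r.2.2.1))
    (hpost1 : ∀ r ∈ post1, ¬(q.1 = r.1 ∧ q.2.1 = r.2.1 ∧ q.2.2.1 = r.2.2.1))
    (t2 : List Char) :
    pvAll ps (p.1 :: p.2.1 :: p.2.2.1 :: q.2.1 :: q.2.2.1 :: t2)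
      ≠ pvOne ps (p.1 :: p.2.1 :: p.2.2.1 :: q.2.1 :: q.2.2.1 :: t2) := by
  have hpps : p ∈ ps := hsplit ▸ List.mem_append_right _ (List.mem_cons_self ..)
  have hqpost : q ∈ post := hpost ▸ List.mem_append_right _ (List.mem_cons_self ..)
  have hqps : q ∈ ps := hsplit ▸ List.mem_append_right _ (List.mem_cons_of_mem _ hqpost)
  have hmpre : ∀ r ∈ pre, r ∈ ps := fun r hr => hsplit ▸ List.mem_append_left _ hr
  have hmpost : ∀ r ∈ post, r ∈ ps := fun r hr =>
    hsplit ▸ List.mem_append_right _ (List.mem_cons_of_mem _ hr)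
  have hmpost1 : ∀ r ∈ post1, r ∈ ps := fun r hr => hmpost r (hpost ▸ List.mem_append_left _ hr)
  have hmpost2 : ∀ r ∈ post2, r ∈ ps := fun r hr =>
    hmpost r (hpost ▸ List.mem_append_right _ (List.mem_cons_of_mem _ hr))
  have hSpre := pvStruct_mono hmpre hS
  have hSpost1 := pvStruct_mono hmpost1 hS
  have hSpost2 := pvStruct_mono hmpost2 hS
  have n1 : ∀ r ∈ pre, ¬ pvMatch r (p.1 :: p.2.1 :: p.2.2.1 :: q.2.1 :: q.2.2.1 :: t2) := by
    intro r hr hm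
    obtain ⟨w, hw⟩ := hm
    obtain ⟨e1, hw⟩ := List.cons_eq_cons.mp hw
    obtain ⟨e2, hw⟩ := List.cons_eq_cons.mp hw
    obtain ⟨e3, _⟩ := List.cons_eq_cons.mp hw
    exact hpre r hr ⟨e1, e2, e3⟩
  have n2 : ∀ r ∈ pre, ¬ pvMatch r (p.2.1 :: p.2.2.1 :: q.2.1 :: q.2.2.1 :: t2) := fun r hr hm =>
    (hS p hpps r (hmpre r hr)).2.2.1 (List.cons_eq_cons.mp hm.choose_spec).1
  have n3 : ∀ r ∈ pre, ¬ pvMatch r (p.2.2.1 :: q.2.1 :: q.2.2.1 :: t2) := fun r hr hm =>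
    (hS p hpps r (hmpre r hr)).2.2.2 (List.cons_eq_cons.mp hm.choose_spec).1
  have n4 : ∀ r ∈ pre, ¬ pvMatch r (q.2.1 :: q.2.2.1 :: t2) := fun r hr hm =>
    (hS q hqps r (hmpre r hr)).2.2.1 (List.cons_eq_cons.mp hm.choose_spec).1
  have n5 : ∀ r ∈ pre, ¬ pvMatch r (q.2.2.1 :: t2) := fun r hr hm =>
    (hS q hqps r (hmpre r hr)).2.2.2 (List.cons_eq_cons.mp hm.choose_spec).1
  have hApre : pvAll pre (p.1 :: p.2.1 :: p.2.2.1 :: q.2.1 :: q.2.2.1 :: t2)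
      = p.1 :: p.2.1 :: p.2.2.1 :: q.2.1 :: q.2.2.1 :: pvAll pre t2 := by
    rw [pvHeadSkip hSpre n1, pvHeadSkip hSpre n2, pvHeadSkip hSpre n3, pvHeadSkip hSpre n4,
      pvHeadSkip hSpre n5]
  have hW1 : pvRepl p (q.2.1 :: q.2.2.1 :: pvAll pre t2)
      = q.2.1 :: q.2.2.1 :: pvRepl p (pvAll pre t2) := by
    rw [pvRepl_nomatch (fun hm =>
        (hS q hqps p hpps).2.2.1 (List.cons_eq_cons.mp hm.choose_spec).1),
      pvRepl_nomatch (fun hm =>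
        (hS q hqps p hpps).2.2.2 (List.cons_eq_cons.mp hm.choose_spec).1)]
  have m1 : ∀ r ∈ post1,
      ¬ pvMatch r (p.2.2.2 :: q.2.1 :: q.2.2.1 :: pvRepl p (pvAll pre t2)) := by
    intro r hr hm
    obtain ⟨w, hw⟩ := hm
    obtain ⟨e1, hw⟩ := List.cons_eq_cons.mp hw
    obtain ⟨e2, hw⟩ := List.cons_eq_cons.mp hw
    obtain ⟨e3, _⟩ := List.cons_eq_cons.mp hw
    exact hpost1 r hr ⟨hq1.trans e1, e2, e3⟩
  have m2 : ∀ r ∈ post1,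
      ¬ pvMatch r (q.2.1 :: q.2.2.1 :: pvRepl p (pvAll pre t2)) := fun r hr hm =>
    (hS q hqps r (hmpost1 r hr)).2.2.1 (List.cons_eq_cons.mp hm.choose_spec).1
  have m3 : ∀ r ∈ post1,
      ¬ pvMatch r (q.2.2.1 :: pvRepl p (pvAll pre t2)) := fun r hr hm =>
    (hS q hqps r (hmpost1 r hr)).2.2.2 (List.cons_eq_cons.mp hm.choose_spec).1
  have hpost1skip : pvAll post1 (p.2.2.2 :: q.2.1 :: q.2.2.1 :: pvRepl p (pvAll pre t2))
      = p.2.2.2 :: q.2.1 :: q.2.2.1 :: pvAll post1 (pvRepl p (pvAll pre t2)) := by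
    rw [pvHeadSkip hSpost1 m1, pvHeadSkip hSpost1 m2, pvHeadSkip hSpost1 m3]
  have hQ : pvRepl q (p.2.2.2 :: q.2.1 :: q.2.2.1 :: pvAll post1 (pvRepl p (pvAll pre t2)))
      = q.2.2.2 :: pvRepl q (pvAll post1 (pvRepl p (pvAll pre t2))) := by
    rw [← hq1]
    exact pvRepl_match q _
  have hpost2skip : ∀ X, pvAll post2 (q.2.2.2 :: X) = q.2.2.2 :: pvAll post2 X := fun X =>
    pvHeadSkip hSpost2 (fun r hr hm => hvnh r (hmpost2 r hr)
      (List.cons_eq_cons.mp hm.choose_spec).1)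
  have hAfinal : pvAll ps (p.1 :: p.2.1 :: p.2.2.1 :: q.2.1 :: q.2.2.1 :: t2)
      = q.2.2.2 :: pvAll post2 (pvRepl q (pvAll post1 (pvRepl p (pvAll pre t2)))) := by
    rw [hsplit, pvAll_append, pvAll_cons, hApre, pvRepl_match, hW1, hpost, pvAll_append,
      pvAll_cons, hpost1skip, hQ, hpost2skip]
  have hfB : ps.find? (fun r => decide (p.1 = r.1 ∧ p.2.1 = r.2.1 ∧ p.2.2.1 = r.2.2.1))
      = some p := by
    refine List.find?_eq_some_iff_append.mpr ⟨by simp, pre, post, hsplit, ?_⟩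
    intro r hr
    simp only [Bool.not_eq_eq_eq_not, Bool.not_true, decide_eq_false_iff_not]
    exact hpre r hr
  have hBfinal : pvOne ps (p.1 :: p.2.1 :: p.2.2.1 :: q.2.1 :: q.2.2.1 :: t2)
      = p.2.2.2 :: pvOne ps (q.2.1 :: q.2.2.1 :: t2) := by
    conv_lhs => rw [pvOne, hfB]
  rw [hAfinal, hBfinal]
  intro heq
  exact hvne (List.cons_eq_cons.mp heq).1

-- wherever a cascade substring occurs, the two results differ
theorem pvNe : ∀ (n : Nat) (cs : List Char), cs.length ≤ n →
    (∃ b ∈ pvBadL, b <:+: cs) → pvAll pvL20 cs ≠ pvOne pvL20 cs := by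
  intro n
  induction n with
  | zero =>
    rintro cs hl ⟨b, hb, hinf⟩
    have hnil : cs = [] := List.eq_nil_of_length_eq_zero (Nat.le_zero.mp hl)
    subst hnil
    have hb5 := pvBadL_len b hb
    rw [List.eq_nil_of_infix_nil hinf] at hb5
    simp at hb5
  | succ n ih =>
    rintro cs hl ⟨b, hbmem, hinf⟩
    have hb5 := pvBadL_len b hbmem
    have hcs5 : 5 ≤ cs.length := hb5 ▸ hinf.length_le
    obtain ⟨r, hrm, htake⟩ := pvBadL_key b hbmem
    have hbshape : b = [r.1, r.2.1, r.2.2.1] ++ b.drop 3 := by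
      have h0 := List.take_append_drop 3 b
      rw [htake] at h0
      exact h0.symm
    rcases cs with _ | ⟨x, cs1⟩
    · simp at hcs5
    rcases cs1 with _ | ⟨y, cs2⟩
    · simp at hcs5
    rcases cs2 with _ | ⟨z, rest⟩
    · simp at hcs5
    by_cases hbp : ∃ b' ∈ pvBadL, b' <+: (x :: y :: z :: rest)
    · obtain ⟨b', hb'm, hb'p⟩ := hbp
      fin_cases hb'm
      · obtain ⟨t2, ht2⟩ := hb'p
        simp only [List.cons_append, List.nil_append] at ht2
        obtain ⟨e1, g1⟩ := List.cons_eq_cons.mp ht2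
        obtain ⟨e2, g2⟩ := List.cons_eq_cons.mp g1
        obtain ⟨e3, g3⟩ := List.cons_eq_cons.mp g2
        subst e1; subst e2; subst e3; subst g3
        exact pvCascNe (pre := []) (post := pvL20.drop 1) (post1 := []) (post2 := pvL20.drop 2)
          (p := ('A','l','a','A')) (q := ('A','r','g','R')) pvStruct_L20 (by decide) (by decide) rfl (by decide)
          (by decide) (by decide) (by decide) t2
      · obtain ⟨t2, ht2⟩ := hb'p
        simp only [List.cons_append, List.nil_append] at ht2
        obtain ⟨e1, g1⟩ := List.cons_eq_cons.mp ht2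
        obtain ⟨e2, g2⟩ := List.cons_eq_cons.mp g1
        obtain ⟨e3, g3⟩ := List.cons_eq_cons.mp g2
        subst e1; subst e2; subst e3; subst g3
        exact pvCascNe (pre := []) (post := pvL20.drop 1) (post1 := [('A','r','g','R')]) (post2 := pvL20.drop 3)
          (p := ('A','l','a','A')) (q := ('A','s','n','N')) pvStruct_L20 (by decide) (by decide) rfl (by decide)
          (by decide) (by decide) (by decide) t2
      · obtain ⟨t2, ht2⟩ := hb'p
        simp only [List.cons_append, List.nil_append] at ht2
        obtain ⟨e1, g1⟩ := List.cons_eq_cons.mp ht2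
        obtain ⟨e2, g2⟩ := List.cons_eq_cons.mp g1
        obtain ⟨e3, g3⟩ := List.cons_eq_cons.mp g2
        subst e1; subst e2; subst e3; subst g3
        exact pvCascNe (pre := []) (post := pvL20.drop 1) (post1 := [('A','r','g','R'), ('A','s','n','N')]) (post2 := pvL20.drop 4)
          (p := ('A','l','a','A')) (q := ('A','s','p','D')) pvStruct_L20 (by decide) (by decide) rfl (by decide)
          (by decide) (by decide) (by decide) t2
      · obtain ⟨t2, ht2⟩ := hb'p
        simp only [List.cons_append, List.nil_append] at ht2
        obtain ⟨e1, g1⟩ := List.cons_eq_cons.mp ht2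
        obtain ⟨e2, g2⟩ := List.cons_eq_cons.mp g1
        obtain ⟨e3, g3⟩ := List.cons_eq_cons.mp g2
        subst e1; subst e2; subst e3; subst g3
        exact pvCascNe (pre := pvL20.take 10) (post := pvL20.drop 11) (post1 := []) (post2 := pvL20.drop 12)
          (p := ('L','e','u','L')) (q := ('L','y','s','K')) pvStruct_L20 (by decide) (by decide) rfl (by decide)
          (by decide) (by decide) (by decide) t2
      · obtain ⟨t2, ht2⟩ := hb'p
        simp only [List.cons_append, List.nil_append] at ht2
        obtain ⟨e1, g1⟩ := List.cons_eq_cons.mp ht2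
        obtain ⟨e2, g2⟩ := List.cons_eq_cons.mp g1
        obtain ⟨e3, g3⟩ := List.cons_eq_cons.mp g2
        subst e1; subst e2; subst e3; subst g3
        exact pvCascNe (pre := pvL20.take 16) (post := pvL20.drop 17) (post1 := []) (post2 := pvL20.drop 18)
          (p := ('T','h','r','T')) (q := ('T','r','p','W')) pvStruct_L20 (by decide) (by decide) rfl (by decide)
          (by decide) (by decide) (by decide) t2
      · obtain ⟨t2, ht2⟩ := hb'p
        simp only [List.cons_append, List.nil_append] at ht2
        obtain ⟨e1, g1⟩ := List.cons_eq_cons.mp ht2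
        obtain ⟨e2, g2⟩ := List.cons_eq_cons.mp g1
        obtain ⟨e3, g3⟩ := List.cons_eq_cons.mp g2
        subst e1; subst e2; subst e3; subst g3
        exact pvCascNe (pre := pvL20.take 16) (post := pvL20.drop 17) (post1 := [('T','r','p','W')]) (post2 := pvL20.drop 19)
          (p := ('T','h','r','T')) (q := ('T','y','r','Y')) pvStruct_L20 (by decide) (by decide) rfl (by decide)
          (by decide) (by decide) (by decide) t2
    · cases hf : pvL20.find? (fun r => decide (x = r.1 ∧ y = r.2.1 ∧ z = r.2.2.1)) with
      | some p =>
        have hpred := List.find?_some hf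
        simp only [decide_eq_true_eq] at hpred
        obtain ⟨e1, e2, e3⟩ := hpred
        subst e1; subst e2; subst e3
        have hpps : p ∈ pvL20 := List.mem_of_find?_eq_some hf
        have hnc : ∀ pre post qq t2q, pvL20 = pre ++ p :: post → qq ∈ post → qq.1 = p.2.2.2 →
            rest ≠ qq.2.1 :: qq.2.2.1 :: t2q := by
          intro pre post qq t2q hsp hq hq1 hteq
          have hpw := pvPairwise_L20
          rw [hsp] at hpw
          have hR := (List.pairwise_cons.mp (List.pairwise_append.mp hpw).2.1).1 qq hq hq1
          exact hbp ⟨pvBad5 p qq, hR, ⟨t2q, by rw [hteq]; simp [pvBad5]⟩⟩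
        have hbt : b <:+: rest := by
          rcases List.infix_cons_iff.mp hinf with hp | h1
          · exact absurd ⟨b, hbmem, hp⟩ hbp
          rcases List.infix_cons_iff.mp h1 with hp | h2
          · obtain ⟨u, hu⟩ := hp
            rw [hbshape] at hu
            simp only [List.cons_append, List.nil_append] at hu
            exact absurd (List.cons_eq_cons.mp hu).1.symm
              (pvStruct_L20 p hpps r hrm).2.2.1
          rcases List.infix_cons_iff.mp h2 with hp | h3
          · obtain ⟨u, hu⟩ := hp
            rw [hbshape] at hu
            simp only [List.cons_append, List.nil_append] at hu
            exact absurd (List.cons_eq_cons.mp hu).1.symm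
              (pvStruct_L20 p hpps r hrm).2.2.2
          · exact h3
        have hIH := ih rest (by simp at hl; omega) ⟨b, hbmem, hbt⟩
        rw [pvStepSome pvStruct_L20 hf hnc]
        intro heq
        rw [show pvOne pvL20 (p.1 :: p.2.1 :: p.2.2.1 :: rest)
            = p.2.2.2 :: pvOne pvL20 rest from by conv_lhs => rw [pvOne, hf]] at heq
        exact hIH (List.cons_eq_cons.mp heq).2
      | none =>
        have hno : ∀ r' ∈ pvL20, ¬ pvMatch r' (x :: y :: z :: rest) := by
          intro r' hr' hm
          obtain ⟨w, hw⟩ := hm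
          obtain ⟨f1, hw⟩ := List.cons_eq_cons.mp hw
          obtain ⟨f2, hw⟩ := List.cons_eq_cons.mp hw
          obtain ⟨f3, _⟩ := List.cons_eq_cons.mp hw
          have := List.find?_eq_none.mp hf r' hr'
          simp only [decide_eq_true_eq] at this
          exact this ⟨f1, f2, f3⟩
        have hbt : b <:+: y :: z :: rest := by
          rcases List.infix_cons_iff.mp hinf with hp | h1
          · obtain ⟨u, hu⟩ := hp
            rw [hbshape] at hu
            simp only [List.cons_append, List.nil_append] at hu
            obtain ⟨f1, hu⟩ := List.cons_eq_cons.mp hu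
            obtain ⟨f2, hu⟩ := List.cons_eq_cons.mp hu
            obtain ⟨f3, _⟩ := List.cons_eq_cons.mp hu
            have := List.find?_eq_none.mp hf r hrm
            simp only [decide_eq_true_eq] at this
            exact absurd ⟨f1.symm, f2.symm, f3.symm⟩ this
          · exact h1
        have hIH := ih (y :: z :: rest) (by simp at hl ⊢; omega) ⟨b, hbmem, hbt⟩
        rw [pvHeadSkip pvStruct_L20 hno]
        intro heq
        rw [show pvOne pvL20 (x :: y :: z :: rest) = x :: pvOne pvL20 (y :: z :: rest) from by
          conv_lhs => rw [pvOne, hf]] at heq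
        exact hIH (List.cons_eq_cons.mp heq).2

-- ---- bridge, A side: PySem.Chars.replace = pvRepl
theorem pvGo (p : PvP) : ∀ (fuel : Nat) (l acc : List Char), l.length ≤ fuel →
    PySem.Chars.replace.go [p.1, p.2.1, p.2.2.1] [p.2.2.2] fuel l acc
      = acc.reverse ++ pvRepl p l := by
  intro fuel
  induction fuel with
  | zero =>
    intro l acc hl
    have : l = [] := List.eq_nil_of_length_eq_zero (by omega)
    subst this
    rw [PySem.Chars.replace.go, pvRepl_short (by simp)]
  | succ n ih =>
    intro l acc hl
    cases l with
    | nil =>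
      rw [PySem.Chars.replace.go]
      · rw [pvRepl_short (by simp)]; simp
      · omega
    | cons c t =>
      by_cases hm : pvMatch p (c :: t)
      · obtain ⟨t2, ht⟩ := hm
        obtain ⟨rfl, h2⟩ := List.cons_eq_cons.mp ht
        subst h2
        rw [PySem.Chars.replace.go]
        have hpre : [p.1, p.2.1, p.2.2.1].isPrefixOf (p.1 :: p.2.1 :: p.2.2.1 :: t2) = true := by
          simp [List.isPrefixOf]
        rw [hpre]
        simp only [if_true]
        have hdrop : List.drop [p.1, p.2.1, p.2.2.1].length (p.1 :: p.2.1 :: p.2.2.1 :: t2)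
            = t2 := rfl
        rw [hdrop, ih t2 _ (by simp only [List.length_cons] at hl ⊢; omega), pvRepl_match]
        simp
      · rw [PySem.Chars.replace.go]
        have hpre : [p.1, p.2.1, p.2.2.1].isPrefixOf (c :: t) = false := by
          refine Bool.eq_false_iff.mpr (fun hT => hm ?_)
          exact pvPrefix3.mp (List.isPrefixOf_iff_prefix.mp hT)
        rw [hpre]
        simp only [Bool.false_eq_true, if_false]
        rw [ih t _ (by simp only [List.length_cons] at hl; omega), pvRepl_nomatch hm]
        simp

theorem pvReplace_eq (p : PvP) (s : List Char) :
    PySem.Chars.replace s [p.1, p.2.1, p.2.2.1] [p.2.2.2] = pvRepl p s := by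
  rw [PySem.Chars.replace]
  simp only [List.isEmpty_cons, Bool.false_eq_true, if_false]
  rw [pvGo p s.length s [] le_rfl]
  simp

theorem pvRepl_noOcc {p : PvP} : ∀ (n : Nat) (s : List Char), s.length ≤ n →
    ¬ ([p.1, p.2.1, p.2.2.1] <:+: s) → pvRepl p s = s := by
  intro n
  induction n with
  | zero =>
    intro s hl _
    exact pvRepl_short (by omega)
  | succ n ih =>
    intro s hl h
    match s with
    | [] => rfl
    | [_] => rfl
    | [_, _] => rfl
    | x :: y :: z :: t =>
      rw [pvRepl]
      split_ifs with hc
      · obtain ⟨e1, e2, e3⟩ := hc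
        exact absurd (List.IsPrefix.isInfix (pvPrefix3.mpr ⟨t, by rw [e1, e2, e3]⟩)) h
      · rw [ih (y :: z :: t) (by simp only [List.length_cons] at hl ⊢; omega)
            (fun hinf => h (hinf.trans (List.infix_cons (List.infix_refl _))))]

theorem pvFoldBridge : ∀ (sps : List (String × String)) (cps : List PvP),
    sps.map (fun kv => (kv.1.toList, kv.2.toList))
      = cps.map (fun p => ([p.1, p.2.1, p.2.2.1], [p.2.2.2])) →
    ∀ s : String,
      (sps.foldl (fun s kv => if PySem.Str.isIn kv.1 s then PySem.Str.replace s kv.1 kv.2 else s)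
        s).toList = pvAll cps s.toList := by
  intro sps
  induction sps with
  | nil =>
    intro cps hmap s
    cases cps with
    | nil => rfl
    | cons _ _ => simp at hmap
  | cons kv rest ih =>
    intro cps hmap s
    cases cps with
    | nil => simp at hmap
    | cons p cps' =>
      simp only [List.map_cons, List.cons_eq_cons, Prod.mk.injEq] at hmap
      obtain ⟨⟨hk, hv⟩, hmap'⟩ := hmap
      have hstep : (if PySem.Str.isIn kv.1 s then PySem.Str.replace s kv.1 kv.2 else s).toList
          = pvRepl p s.toList := by
        by_cases hin : PySem.Str.isIn kv.1 s = true
        · rw [if_pos hin, PySem.Str.toList_replace, hk, hv, pvReplace_eq]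
        · rw [if_neg hin]
          have hninf : ¬ ([p.1, p.2.1, p.2.2.1] <:+: s.toList) := by
            intro hinf
            exact hin ((PySem.Str.isIn_iff_infix _ _).mpr (hk ▸ hinf))
          exact (pvRepl_noOcc s.toList.length s.toList le_rfl hninf).symm
      rw [List.foldl_cons, ih cps' hmap' _, hstep]
      simp [pvAll]

theorem pvA_toList (seq : String) : (AATranslate seq).toList = pvAll pvL20 seq.toList :=
  pvFoldBridge pvPairs pvL20 rfl seq

-- ---- bridge, B side: the while loop = pvOne
set_option maxHeartbeats 1600000 in
set_option maxRecDepth 100000 in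
theorem pvDictB_eq : pvDictB = PySem.Dict.ofList pvPairs := by decide


theorem pvIntercalateNil (l : List (List Char)) : List.intercalate [] l = l.flatten := by
  induction l with
  | nil => rfl
  | cons a t ih =>
    cases t with
    | nil => simp [List.intercalate]
    | cons b t2 =>
      simp only [List.intercalate, List.intersperse, List.flatten_cons] at *
      simp [ih]

theorem pvJoin_toList (l : List String) :
    (PySem.Str.join "" l).toList = (l.map String.toList).flatten := by
  rw [PySem.Str.toList_join]
  exact pvIntercalateNil _

def pvTriples : List (List Char) :=
  [['A','l','a'], ['A','r','g'], ['A','s','n'], ['A','s','p'], ['C','y','s'],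
   ['G','l','n'], ['G','l','u'], ['G','l','y'], ['H','i','s'], ['I','l','e'],
   ['L','e','u'], ['L','y','s'], ['M','e','t'], ['P','h','e'], ['P','r','o'],
   ['S','e','r'], ['T','h','r'], ['T','r','p'], ['T','y','r'], ['V','a','l']]

theorem pvKeys_map : pvDictB.keys.map String.toList = pvTriples := by rw [pvDictB_eq]; decide

theorem pvContains_triples {u : String} (h : pvDictB.contains u = true) :
    u.toList ∈ pvTriples := by
  have hm := (PySem.Dict.contains_iff_mem_keys _ _).mp h
  rw [← pvKeys_map]
  exact List.mem_map_of_mem hm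

theorem pvTriples_L20 : ∀ l ∈ pvTriples, ∃ p, p ∈ pvL20 ∧ l = [p.1, p.2.1, p.2.2.1] := by
  decide

theorem pvDict_some {u : String} {p : PvP} (hp : p ∈ pvL20)
    (hu : u.toList = [p.1, p.2.1, p.2.2.1]) :
    pvDictB.contains u = true ∧ pvDictB.getD u "" = String.ofList [p.2.2.2] := by
  have hueq : u = String.ofList [p.1, p.2.1, p.2.2.1] :=
    String.toList_inj.mp (by rw [hu, String.toList_ofList])
  subst hueq
  rw [pvDictB_eq]
  fin_cases hp <;> exact ⟨by decide, by decide⟩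

theorem pvDict_none {x y z : Char} {u : String} (hu : u.toList = [x, y, z])
    (hf : pvL20.find? (fun p => decide (x = p.1 ∧ y = p.2.1 ∧ z = p.2.2.1)) = none) :
    pvDictB.contains u = false := by
  refine Bool.eq_false_iff.mpr (fun hT => ?_)
  obtain ⟨p, hp, hpe⟩ := pvTriples_L20 _ (hu ▸ pvContains_triples hT)
  obtain ⟨e1, hpe⟩ := List.cons_eq_cons.mp hpe
  obtain ⟨e2, hpe⟩ := List.cons_eq_cons.mp hpe
  obtain ⟨e3, _⟩ := List.cons_eq_cons.mp hpe
  have := List.find?_eq_none.mp hf p hp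
  simp only [decide_eq_true_eq] at this
  exact this ⟨e1, e2, e3⟩

theorem pvDict_short {u : String} (h : u.toList.length ≠ 3) :
    pvDictB.contains u = false := by
  refine Bool.eq_false_iff.mpr (fun hT => ?_)
  have := pvContains_triples hT
  have hlen : ∀ l ∈ pvTriples, l.length = 3 := by decide
  exact h (hlen _ this)

theorem pvTok_toList (seq : String) (j : Nat) :
    (PySem.Str.slice seq (some (j : Int)) (some ((j : Int) + 3))).toList
      = (seq.toList.drop j).take 3 := by
  rw [PySem.Str.toList_slice]
  simp only [PySem.Chars.slice_eq_listSlice]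
  have h3 : ((j : Int) + 3) = ((j + 3 : Nat) : Int) := by push_cast; ring
  rw [h3, PySem.List.slice_natCast]
  congr 1
  omega

theorem pvAltGo_eq (seq : String) :
    ∀ (k j : Nat), seq.toList.length - j ≤ k →
    ((pvAltGo seq (PySem.Str.len seq) (j : Int)).map String.toList).flatten
      = pvOne pvL20 (seq.toList.drop j) := by
  intro k
  induction k with
  | zero =>
    intro j h
    have hj : seq.toList.length ≤ j := by omega
    rw [pvAltGo, dif_neg (by rw [PySem.Str.len_eq]; exact_mod_cast not_lt.mpr hj),
      List.drop_eq_nil_of_le hj]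
    rfl
  | succ k ih =>
    intro j h
    by_cases hj : j < seq.toList.length
    · rw [pvAltGo, dif_pos (by rw [PySem.Str.len_eq]; exact_mod_cast hj)]
      have hlen : (seq.toList.drop j).length = seq.toList.length - j := List.length_drop ..
      have htok := pvTok_toList seq j
      have hd3 : seq.toList.drop (j + 3) = (seq.toList.drop j).drop 3 := by
        rw [List.drop_drop]
      have hd1 : seq.toList.drop (j + 1) = (seq.toList.drop j).drop 1 := by
        rw [List.drop_drop]
      have hcast3 : (j : Int) + 3 = ((j + 3 : Nat) : Int) := by push_cast; ring
      have hcast1 : (j : Int) + 1 = ((j + 1 : Nat) : Int) := by push_cast; ring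
      have hget : PySem.Str.pyGet? seq (j : Int) = seq.toList[j]? := PySem.Str.pyGet?_natCast ..
      have hx0 : ∀ x rest, seq.toList.drop j = x :: rest → seq.toList[j]? = some x := by
        intro x rest hr
        have h0 := List.getElem?_drop (xs := seq.toList) (i := j) (j := 0)
        rw [hr] at h0
        simpa using h0.symm
      rcases hdrop : seq.toList.drop j with _ | ⟨x, _ | ⟨y, _ | ⟨z, t⟩⟩⟩
      · rw [hdrop] at hlen; simp only [List.length_nil] at hlen; omega
      · have hcf : pvDictB.contains (PySem.Str.slice seq (some (j:Int)) (some ((j:Int)+3)))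
            = false := pvDict_short (by rw [htok, hdrop]; simp)
        simp only [hcf, Bool.false_eq_true, if_false, List.map_cons, List.flatten_cons,
          hget, hx0 x _ hdrop, Option.map_some, Option.getD_some, String.toList_ofList]
        rw [hcast1, ih (j + 1) (by omega), hd1, hdrop,
          show List.drop 1 [x] = ([] : List Char) from rfl,
          pvOne_short (ps := pvL20) (s := ([] : List Char)) (by simp),
          pvOne_short (ps := pvL20) (s := [x]) (by simp)]
        simp
      · have hcf : pvDictB.contains (PySem.Str.slice seq (some (j:Int)) (some ((j:Int)+3)))
            = false := pvDict_short (by rw [htok, hdrop]; simp)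
        simp only [hcf, Bool.false_eq_true, if_false, List.map_cons, List.flatten_cons,
          hget, hx0 x _ hdrop, Option.map_some, Option.getD_some, String.toList_ofList]
        rw [hcast1, ih (j + 1) (by omega), hd1, hdrop,
          show List.drop 1 [x, y] = [y] from rfl,
          pvOne_short (ps := pvL20) (s := [y]) (by simp),
          pvOne_short (ps := pvL20) (s := [x, y]) (by simp)]
        simp
      · have hlen3 : t.length + 3 = seq.toList.length - j := by
          rw [hdrop] at hlen; simpa using hlen
        cases hf : pvL20.find? (fun p => decide (x = p.1 ∧ y = p.2.1 ∧ z = p.2.2.1)) with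
        | some p =>
          have hpm : p ∈ pvL20 := List.mem_of_find?_eq_some hf
          have hpr := List.find?_some hf
          simp only [decide_eq_true_eq] at hpr
          obtain ⟨e1, e2, e3⟩ := hpr
          have htok3 : (PySem.Str.slice seq (some (j:Int)) (some ((j:Int)+3))).toList
              = [p.1, p.2.1, p.2.2.1] := by
            rw [htok, hdrop, ← e1, ← e2, ← e3]
            rfl
          obtain ⟨hcT, hgT⟩ := pvDict_some hpm htok3
          simp only [hcT, if_true, List.map_cons, List.flatten_cons, hgT, String.toList_ofList]
          rw [hcast3, ih (j + 3) (by omega), hd3, hdrop]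
          conv_rhs => rw [pvOne, hf]
          simp
        | none =>
          have hcf : pvDictB.contains (PySem.Str.slice seq (some (j:Int)) (some ((j:Int)+3)))
              = false := pvDict_none (by rw [htok, hdrop]; rfl) hf
          simp only [hcf, Bool.false_eq_true, if_false, List.map_cons, List.flatten_cons,
            hget, hx0 x _ hdrop, Option.map_some, Option.getD_some, String.toList_ofList]
          rw [hcast1, ih (j + 1) (by omega), hd1, hdrop]
          conv_rhs => rw [pvOne, hf]
          simp
    · rw [pvAltGo, dif_neg (by rw [PySem.Str.len_eq]; exact_mod_cast hj),
        List.drop_eq_nil_of_le (by omega)]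
      rfl

theorem pvB_toList (seq : String) :
    (AATranslate_alt seq).toList = pvOne pvL20 seq.toList := by
  rw [AATranslate_alt, pvJoin_toList]
  have := pvAltGo_eq seq seq.toList.length 0 (by omega)
  simpa using this

-- ---- D_ free strings are cascade free
theorem pvNoD_badfree {seq : String} (h : ¬ D_AATranslate seq) :
    pvBadFree pvL20 seq.toList := by
  rintro p q ⟨pre, post, hsplit, hq⟩ hq1 hinf
  have hpw := pvPairwise_L20
  rw [hsplit] at hpw
  have hR := (List.pairwise_cons.mp (List.pairwise_append.mp hpw).2.1).1 q hq
  have hmem := hR hq1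
  apply h
  unfold D_AATranslate
  simp only [pvBadL, List.mem_cons, List.not_mem_nil, or_false] at hmem
  rcases hmem with h1 | h1 | h1 | h1 | h1 | h1 <;> rw [h1] at hinf
  · exact Or.inl ((PySem.Str.isIn_iff_infix _ _).mpr hinf)
  · exact Or.inr (Or.inl ((PySem.Str.isIn_iff_infix _ _).mpr hinf))
  · exact Or.inr (Or.inr (Or.inl ((PySem.Str.isIn_iff_infix _ _).mpr hinf)))
  · exact Or.inr (Or.inr (Or.inr (Or.inl ((PySem.Str.isIn_iff_infix _ _).mpr hinf))))
  · exact Or.inr (Or.inr (Or.inr (Or.inr (Or.inl ((PySem.Str.isIn_iff_infix _ _).mpr hinf)))))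
  · exact Or.inr (Or.inr (Or.inr (Or.inr (Or.inr ((PySem.Str.isIn_iff_infix _ _).mpr hinf)))))

-- ===== VERDICT (by name: the statement is the Claim_ definition above) =====
theorem AATranslate_spec : Claim_unchanged_AATranslate := by
  intro seq _ hD
  apply String.toList_inj.mp
  rw [pvA_toList, pvB_toList]
  exact pvGen pvStruct_L20 seq.toList.length seq.toList le_rfl (pvNoD_badfree hD)

set_option maxRecDepth 100000 in
theorem AATranslate_changed : Claim_changed_AATranslate := by
  unfold Claim_changed_AATranslate
  refine ⟨by decide, by decide, by decide, ?_, by decide⟩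
  apply String.toList_inj.mp
  rw [pvB_toList]
  decide

theorem AATranslate_tight : Claim_exact_AATranslate := by
  intro seq _ hD heq
  have hex : ∃ b ∈ pvBadL, b <:+: seq.toList := by
    rcases hD with h | h | h | h | h | h
    · exact ⟨['A','l','a','r','g'], by simp [pvBadL], (PySem.Str.isIn_iff_infix _ _).mp h⟩
    · exact ⟨['A','l','a','s','n'], by simp [pvBadL], (PySem.Str.isIn_iff_infix _ _).mp h⟩
    · exact ⟨['A','l','a','s','p'], by simp [pvBadL], (PySem.Str.isIn_iff_infix _ _).mp h⟩
    · exact ⟨['L','e','u','y','s'], by simp [pvBadL], (PySem.Str.isIn_iff_infix _ _).mp h⟩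
    · exact ⟨['T','h','r','r','p'], by simp [pvBadL], (PySem.Str.isIn_iff_infix _ _).mp h⟩
    · exact ⟨['T','h','r','y','r'], by simp [pvBadL], (PySem.Str.isIn_iff_infix _ _).mp h⟩
  exact pvNe seq.toList.length seq.toList le_rfl hex
    (by rw [← pvA_toList, ← pvB_toList, heq])
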